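-- pv_equiv track=rewrite | github.com/Ujwal1233/Core-Python | Strings/Anagrams.py | strFilteration
-- ===== SOURCE A (Python) =====
-- def strFilteration(s):
--     nstr = ""
--     for i in range(0, len(s)):
--         if "A" <= s[i] <= "Z":
--             nstr+=chr(ord(s[i]) + 32)
--         elif "a" <= s[i] <= "z":
--             nstr+=s[i]
--     return nstr
-- ===== SOURCE B (Python) =====
-- _TABLE = {c: (c + 32 if 65 <= c <= 90 else (c if 97 <= c <= 122 else None))
--           for c in range(128)}
--
-- def strFilteration(s):
--     return s.translate(_TABLE)
-- ===== Notes on version B (the rewrite author's own statement) =====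
-- stated objective: faster
-- what changed: Replaces the per-character branch-and-concatenate loop by a precomputed 128-entry translation table (ord -> lowercase ord, identity, or delete) applied with a single str.translate call.
import Mathlib
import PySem

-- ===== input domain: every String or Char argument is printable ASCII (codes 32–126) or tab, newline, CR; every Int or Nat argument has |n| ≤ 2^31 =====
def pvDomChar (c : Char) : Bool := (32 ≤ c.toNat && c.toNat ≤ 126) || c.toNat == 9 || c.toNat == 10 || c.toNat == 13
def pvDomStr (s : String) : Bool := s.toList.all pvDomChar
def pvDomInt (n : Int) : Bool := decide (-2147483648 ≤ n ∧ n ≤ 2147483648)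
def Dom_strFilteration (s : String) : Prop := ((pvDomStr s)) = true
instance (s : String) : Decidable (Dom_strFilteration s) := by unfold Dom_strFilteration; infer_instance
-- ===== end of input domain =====

-- B replaces A's per-character branch-and-concatenate loop by a precomputed 128-entry
-- translation table (ord -> lowercase ord / identity / delete) applied with str.translate.
-- ===== PORT A =====
def strFilteration (s : String) : String :=
  String.ofList ((PySem.List.pyRange 0 (PySem.Str.len s) 1).foldl
    (fun nstr i =>
      let c := PySem.List.pyGetD s.toList i ' '
      if 'A' ≤ c ∧ c ≤ 'Z' then nstr ++ [Char.ofNat (c.toNat + 32)]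
      else if 'a' ≤ c ∧ c ≤ 'z' then nstr ++ [c] else nstr) [])

-- ===== PORT B =====
-- module-level table: {c: c+32 if 65<=c<=90 else (c if 97<=c<=122 else None) for c in range(128)}
def pvTable : PySem.Dict Int (Option Int) :=
  (PySem.List.pyRange 0 128 1).foldl
    (fun d c => d.insert c (if 65 ≤ c ∧ c ≤ 90 then some (c + 32)
                            else if 97 ≤ c ∧ c ≤ 122 then some c else none))
    PySem.Dict.empty

-- hand port of str.translate with an int-keyed dict table (exact: look up ord(ch);
-- value int n -> chr(n), value None -> delete, key missing -> keep the character)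
def pvTranslate (tbl : PySem.Dict Int (Option Int)) (cs : List Char) : List Char :=
  cs.foldl (fun acc c =>
    match tbl.get? (c.toNat : Int) with
    | some (some n) => acc ++ [Char.ofNat n.toNat]
    | some none => acc
    | none => acc ++ [c]) []

def strFilteration_alt (s : String) : String :=
  String.ofList (pvTranslate pvTable s.toList)

-- ===== PRECONDITION & SPEC =====
def Spec_strFilteration (s : String) (out : String) : Prop := out = strFilteration_alt s
instance (s : String) (out : String) : Decidable (Spec_strFilteration s out) := by unfold Spec_strFilteration; infer_instance

-- ===== CLAIM (what is proved, stated in full; the proofs are below) =====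
def Claim_equal_strFilteration : Prop := ∀ (s : String), Dom_strFilteration s → Spec_strFilteration s (strFilteration s)

-- ===== LEMMAS AND PROOFS =====

-- the table lookup computed out, for every key 0..127
set_option maxRecDepth 40000 in
theorem pv_lookup : ∀ n ∈ List.range 128, pvTable.get? (n : Int) =
    some (if 65 ≤ (n : Int) ∧ (n : Int) ≤ 90 then some ((n : Int) + 32)
          else if 97 ≤ (n : Int) ∧ (n : Int) ≤ 122 then some ((n : Int)) else none) := by
  decide

-- both loop bodies agree on every in-domain character
theorem pv_char_step (c : Char) (h : pvDomChar c = true) (acc : List Char) :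
    (match pvTable.get? ((c.toNat : Int)) with
      | some (some n) => acc ++ [Char.ofNat n.toNat]
      | some none => acc
      | none => acc ++ [c])
    = (if 'A' ≤ c ∧ c ≤ 'Z' then acc ++ [Char.ofNat (c.toNat + 32)]
       else if 'a' ≤ c ∧ c ≤ 'z' then acc ++ [c] else acc) := by
  have hlt : c.toNat < 128 := by
    simp only [pvDomChar, Bool.or_eq_true, Bool.and_eq_true, decide_eq_true_eq,
      beq_iff_eq] at h
    omega
  rw [pv_lookup c.toNat (List.mem_range.mpr hlt)]
  have hAZ : ('A' ≤ c ∧ c ≤ 'Z') ↔ (65 ≤ (c.toNat : Int) ∧ (c.toNat : Int) ≤ 90) := by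
    rw [show ('A' ≤ c) ↔ (65 ≤ c.toNat) from by rw [Char.le_def]; exact UInt32.le_iff_toNat_le,
        show (c ≤ 'Z') ↔ (c.toNat ≤ 90) from by rw [Char.le_def]; exact UInt32.le_iff_toNat_le]
    omega
  have haz : ('a' ≤ c ∧ c ≤ 'z') ↔ (97 ≤ (c.toNat : Int) ∧ (c.toNat : Int) ≤ 122) := by
    rw [show ('a' ≤ c) ↔ (97 ≤ c.toNat) from by rw [Char.le_def]; exact UInt32.le_iff_toNat_le,
        show (c ≤ 'z') ↔ (c.toNat ≤ 122) from by rw [Char.le_def]; exact UInt32.le_iff_toNat_le]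
    omega
  by_cases hu : 'A' ≤ c ∧ c ≤ 'Z'
  · rw [if_pos (hAZ.mp hu), if_pos hu]
    show acc ++ [Char.ofNat ((c.toNat : Int) + 32).toNat] = acc ++ [Char.ofNat (c.toNat + 32)]
    have h32 : ((c.toNat : Int) + 32).toNat = c.toNat + 32 := by omega
    rw [h32]
  · rw [if_neg (fun x => hu (hAZ.mpr x))]
    by_cases hl : 'a' ≤ c ∧ c ≤ 'z'
    · rw [if_pos (haz.mp hl), if_neg hu, if_pos hl]
      show acc ++ [Char.ofNat ((c.toNat : Int)).toNat] = acc ++ [c]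
      rw [Int.toNat_natCast, Char.ofNat_toNat]
    · rw [if_neg (fun x => hl (haz.mpr x)), if_neg hu, if_neg hl]

-- the two folds agree character by character on in-domain strings
set_option maxRecDepth 40000 in
theorem pv_fold (cs : List Char) (h : cs.all pvDomChar = true) (acc : List Char) :
    cs.foldl (fun nstr c =>
      if 'A' ≤ c ∧ c ≤ 'Z' then nstr ++ [Char.ofNat (c.toNat + 32)]
      else if 'a' ≤ c ∧ c ≤ 'z' then nstr ++ [c] else nstr) acc
    = cs.foldl (fun acc c =>
        match pvTable.get? ((c.toNat : Int)) with
        | some (some n) => acc ++ [Char.ofNat n.toNat]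
        | some none => acc
        | none => acc ++ [c]) acc := by
  induction cs generalizing acc with
  | nil => rfl
  | cons c cs ih =>
    simp only [List.all_cons, Bool.and_eq_true] at h
    simp only [List.foldl_cons]
    rw [pv_char_step c h.1, ih h.2]

-- ===== VERDICT (by name: the statement is the Claim_ definition above) =====
set_option maxRecDepth 40000 in
theorem strFilteration_spec : Claim_equal_strFilteration := by
  intro s hd
  unfold Spec_strFilteration strFilteration strFilteration_alt pvTranslate
  have h := PySem.List.foldl_pyRange_zero_pyGetD s.toList ' '
    (fun nstr c =>
      if 'A' ≤ c ∧ c ≤ 'Z' then nstr ++ [Char.ofNat (c.toNat + 32)]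
      else if 'a' ≤ c ∧ c ≤ 'z' then nstr ++ [c] else nstr) ([] : List Char)
  exact (congrArg String.ofList h).trans
    (congrArg String.ofList (pv_fold s.toList hd []))
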